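-- pv_equiv track=rewrite | github.com/ajayadaha1/AI-SDC-Profiling | backend/tests/test_e2e_regression.py | extract_ai_tools
-- ===== SOURCE A (Python) =====
-- def extract_ai_tools(prediction: dict) -> list[str]:
--     """Extract tool names from AI prediction commands."""
--     tools = []
--     if not prediction or "commands" not in prediction:
--         return tools
--
--     for cmd in prediction["commands"]:
--         command_str = cmd.get("command", "")
--         if "MaxCoreStim" in command_str:
--             tools.append("MaxCoreStim")
--         elif "AMPTTK" in command_str or "AMPTTKv" in command_str:
--             tools.append("AMPTTK")
--         elif "miidct" in command_str:
--             tools.append("miidct")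
--         elif "DIFECT" in command_str:
--             tools.append("DIFECT")
--         elif "cpuchecker" in command_str:
--             tools.append("cpuchecker")
--         else:
--             tools.append(command_str.split()[0] if command_str else "unknown")
--     return tools
-- ===== SOURCE B (Python) =====
-- # B inverts the loop nesting: first compute every command's fallback name,
-- # then one overwrite pass per table entry in reverse priority order (objective: alternative).
-- def extract_ai_tools(prediction: dict) -> list[str]:
--     if not prediction or "commands" not in prediction:
--         return []
--     cmds = [cmd.get("command", "") for cmd in prediction["commands"]]
--     tools = [c.split()[0] if c else "unknown" for c in cmds]
--     for sub, name in [("cpuchecker", "cpuchecker"), ("DIFECT", "DIFECT"),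
--                       ("miidct", "miidct"), ("AMPTTK", "AMPTTK"),
--                       ("MaxCoreStim", "MaxCoreStim")]:
--         tools = [name if sub in c else t for c, t in zip(cmds, tools)]
--     return tools
-- ===== Notes on version B (the rewrite author's own statement) =====
-- stated objective: alternative
-- what changed: B inverts the loop nesting: it precomputes every command's fallback name in one pass, then makes one overwrite pass per (substring, tool) table entry in reverse priority order, instead of A's per-command if/elif chain (the redundant 'AMPTTKv' test is dropped since any string containing it contains 'AMPTTK').
import Mathlib
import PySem

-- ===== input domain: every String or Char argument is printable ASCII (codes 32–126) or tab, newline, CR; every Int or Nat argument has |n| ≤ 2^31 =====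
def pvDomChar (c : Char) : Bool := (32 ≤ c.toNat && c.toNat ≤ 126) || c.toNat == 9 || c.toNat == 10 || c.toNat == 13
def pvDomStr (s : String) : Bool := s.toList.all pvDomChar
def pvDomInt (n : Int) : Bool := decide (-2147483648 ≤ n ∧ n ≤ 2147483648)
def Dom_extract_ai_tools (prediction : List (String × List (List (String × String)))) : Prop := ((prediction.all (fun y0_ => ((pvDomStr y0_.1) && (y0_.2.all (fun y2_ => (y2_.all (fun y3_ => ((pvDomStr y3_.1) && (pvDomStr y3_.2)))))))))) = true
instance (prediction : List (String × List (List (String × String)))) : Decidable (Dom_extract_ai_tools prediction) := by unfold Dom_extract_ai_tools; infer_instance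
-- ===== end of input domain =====

-- B inverts the loop nesting: fallback names first, then one overwrite pass per table entry
-- in reverse priority order (objective: alternative).

-- ===== PORT A =====
def extract_ai_tools (prediction : List (String × List (List (String × String)))) : List String :=
  let tools : List String := []
  if prediction = [] ∨ (PySem.Dict.mk prediction).contains "commands" = false then tools
  else
    ((PySem.Dict.mk prediction).getD "commands" []).foldl (fun tools cmd =>
      let command_str := (PySem.Dict.mk cmd).getD "command" ""
      if PySem.Str.isIn "MaxCoreStim" command_str then tools ++ ["MaxCoreStim"]
      else if PySem.Str.isIn "AMPTTK" command_str || PySem.Str.isIn "AMPTTKv" command_str then tools ++ ["AMPTTK"]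
      else if PySem.Str.isIn "miidct" command_str then tools ++ ["miidct"]
      else if PySem.Str.isIn "DIFECT" command_str then tools ++ ["DIFECT"]
      else if PySem.Str.isIn "cpuchecker" command_str then tools ++ ["cpuchecker"]
      -- command_str.split()[0]: total pyGetD form; Pre_ excludes the IndexError inputs
      else tools ++ [if command_str ≠ "" then PySem.List.pyGetD (PySem.Str.split₀ command_str) 0 "" else "unknown"])
      tools

-- ===== PORT B =====
def extract_ai_tools_alt (prediction : List (String × List (List (String × String)))) : List String :=
  if prediction = [] ∨ (PySem.Dict.mk prediction).contains "commands" = false then []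
  else
    let cmds := ((PySem.Dict.mk prediction).getD "commands" []).map
      (fun cmd => (PySem.Dict.mk cmd).getD "command" "")
    let tools := cmds.map
      (fun c => if c ≠ "" then PySem.List.pyGetD (PySem.Str.split₀ c) 0 "" else "unknown")
    ([("cpuchecker", "cpuchecker"), ("DIFECT", "DIFECT"), ("miidct", "miidct"),
      ("AMPTTK", "AMPTTK"), ("MaxCoreStim", "MaxCoreStim")] : List (String × String)).foldl
      (fun tools p => (cmds.zip tools).map
        (fun ct => if PySem.Str.isIn p.1 ct.1 then p.2 else ct.2)) tools

-- ===== PRECONDITION & SPEC =====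
-- Pre_ excludes exactly the inputs where Python A (and B) raise IndexError:
-- a command string that is nonempty but all whitespace, so .split()[0] has nothing to index.
def Pre_extract_ai_tools (prediction : List (String × List (List (String × String)))) : Prop :=
  ∀ cmd ∈ (PySem.Dict.mk prediction).getD "commands" [],
    (PySem.Dict.mk cmd).getD "command" "" = "" ∨
    PySem.Str.strip ((PySem.Dict.mk cmd).getD "command" "") ≠ ""
instance (prediction : List (String × List (List (String × String)))) : Decidable (Pre_extract_ai_tools prediction) := by unfold Pre_extract_ai_tools; infer_instance

def pvWitness_extract_ai_tools : (List (String × List (List (String × String)))) :=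
  [("commands", [[("command", "ls -la")], [("command", "run MaxCoreStim")], [("note", "x")]])]

def Spec_extract_ai_tools (prediction : List (String × List (List (String × String)))) (out : List String) : Prop := out = extract_ai_tools_alt prediction
instance (prediction : List (String × List (List (String × String)))) (out : List String) : Decidable (Spec_extract_ai_tools prediction out) := by unfold Spec_extract_ai_tools; infer_instance

-- ===== CLAIM (what is proved, stated in full; the proofs are below) =====
def Claim_equal_extract_ai_tools : Prop := ∀ (prediction : List (String × List (List (String × String)))), Dom_extract_ai_tools prediction → Pre_extract_ai_tools prediction → Spec_extract_ai_tools prediction (extract_ai_tools prediction)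

-- ===== LEMMAS AND PROOFS =====

-- any string containing "AMPTTKv" contains "AMPTTK"
lemma isIn_AMPTTK_of_isIn_AMPTTKv (l : List Char)
    (h : PySem.Chars.isIn ['A','M','P','T','T','K','v'] l = true) :
    PySem.Chars.isIn ['A','M','P','T','T','K'] l = true := by
  rw [PySem.Chars.isIn_iff_infix] at h ⊢
  exact List.IsInfix.trans (by decide) h

-- one overwrite pass over zipped (command, tool) pairs, when tools is a map of the commands
lemma zipmap_overwrite (cmds : List String) (h : String → String) (sub v : String) :
    ((cmds.zip (cmds.map h)).map
      (fun ct : String × String => if PySem.Str.isIn sub ct.1 then v else ct.2))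
    = cmds.map (fun c => if PySem.Str.isIn sub c then v else h c) := by
  induction cmds with
  | nil => rfl
  | cons a t ih => simp only [List.map_cons, List.zip_cons_cons]; rw [ih]

-- A's per-command if/elif chain equals B's staged overwrites, read per command
lemma chain_eq_staged (s : String) :
    (if PySem.Str.isIn "MaxCoreStim" s then "MaxCoreStim"
     else if PySem.Str.isIn "AMPTTK" s || PySem.Str.isIn "AMPTTKv" s then "AMPTTK"
     else if PySem.Str.isIn "miidct" s then "miidct"
     else if PySem.Str.isIn "DIFECT" s then "DIFECT"
     else if PySem.Str.isIn "cpuchecker" s then "cpuchecker"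
     else if s ≠ "" then PySem.List.pyGetD (PySem.Str.split₀ s) 0 "" else "unknown")
    = (if PySem.Str.isIn "MaxCoreStim" s then "MaxCoreStim"
       else if PySem.Str.isIn "AMPTTK" s then "AMPTTK"
       else if PySem.Str.isIn "miidct" s then "miidct"
       else if PySem.Str.isIn "DIFECT" s then "DIFECT"
       else if PySem.Str.isIn "cpuchecker" s then "cpuchecker"
       else if s ≠ "" then PySem.List.pyGetD (PySem.Str.split₀ s) 0 "" else "unknown") := by
  by_cases h1 : PySem.Chars.isIn ['A','M','P','T','T','K'] s.toList = true
  · simp [PySem.Str.isIn, h1]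
  · have h2 : PySem.Chars.isIn ['A','M','P','T','T','K','v'] s.toList = false := by
      by_contra hc
      exact h1 (isIn_AMPTTK_of_isIn_AMPTTKv s.toList (by simpa using hc))
    simp [PySem.Str.isIn, h1, h2]

-- A's accumulator fold appends the chain value per command
lemma foldl_chain_eq_map (cmds : List (List (String × String))) (acc : List String) :
    cmds.foldl (fun tools cmd =>
      let command_str := (PySem.Dict.mk cmd).getD "command" ""
      if PySem.Str.isIn "MaxCoreStim" command_str then tools ++ ["MaxCoreStim"]
      else if PySem.Str.isIn "AMPTTK" command_str || PySem.Str.isIn "AMPTTKv" command_str then tools ++ ["AMPTTK"]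
      else if PySem.Str.isIn "miidct" command_str then tools ++ ["miidct"]
      else if PySem.Str.isIn "DIFECT" command_str then tools ++ ["DIFECT"]
      else if PySem.Str.isIn "cpuchecker" command_str then tools ++ ["cpuchecker"]
      else tools ++ [if command_str ≠ "" then PySem.List.pyGetD (PySem.Str.split₀ command_str) 0 "" else "unknown"]) acc
    = acc ++ cmds.map (fun cmd =>
        let s := (PySem.Dict.mk cmd).getD "command" ""
        if PySem.Str.isIn "MaxCoreStim" s then "MaxCoreStim"
        else if PySem.Str.isIn "AMPTTK" s || PySem.Str.isIn "AMPTTKv" s then "AMPTTK"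
        else if PySem.Str.isIn "miidct" s then "miidct"
        else if PySem.Str.isIn "DIFECT" s then "DIFECT"
        else if PySem.Str.isIn "cpuchecker" s then "cpuchecker"
        else if s ≠ "" then PySem.List.pyGetD (PySem.Str.split₀ s) 0 "" else "unknown") := by
  induction cmds generalizing acc with
  | nil => simp
  | cons c t ih =>
    simp only [List.foldl_cons, List.map_cons]
    rw [ih]
    split_ifs <;> simp

-- B's five overwrite passes collapse to one map of the first-match chain
lemma staged_eq_map (cmds : List String) :
    (([("cpuchecker", "cpuchecker"), ("DIFECT", "DIFECT"), ("miidct", "miidct"),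
       ("AMPTTK", "AMPTTK"), ("MaxCoreStim", "MaxCoreStim")] : List (String × String)).foldl
      (fun tools p => (cmds.zip tools).map
        (fun ct : String × String => if PySem.Str.isIn p.1 ct.1 then p.2 else ct.2))
      (cmds.map (fun c => if c ≠ "" then PySem.List.pyGetD (PySem.Str.split₀ c) 0 "" else "unknown")))
    = cmds.map (fun s =>
        if PySem.Str.isIn "MaxCoreStim" s then "MaxCoreStim"
        else if PySem.Str.isIn "AMPTTK" s then "AMPTTK"
        else if PySem.Str.isIn "miidct" s then "miidct"
        else if PySem.Str.isIn "DIFECT" s then "DIFECT"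
        else if PySem.Str.isIn "cpuchecker" s then "cpuchecker"
        else if s ≠ "" then PySem.List.pyGetD (PySem.Str.split₀ s) 0 "" else "unknown") := by
  simp only [List.foldl_cons, List.foldl_nil]
  rw [zipmap_overwrite, zipmap_overwrite, zipmap_overwrite, zipmap_overwrite, zipmap_overwrite]

-- ===== VERDICT (by name: the statement is the Claim_ definition above) =====
theorem extract_ai_tools_spec : Claim_equal_extract_ai_tools := by
  intro prediction _ _
  unfold Spec_extract_ai_tools extract_ai_tools extract_ai_tools_alt
  split_ifs with h
  · rfl
  · simp only []
    rw [staged_eq_map, List.map_map,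
      foldl_chain_eq_map ((PySem.Dict.mk prediction).getD "commands" []) []]
    simp only [List.nil_append]
    exact List.map_congr_left (fun cmd _ => chain_eq_staged _)
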